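-- pv_equiv track=rewrite | github.com/nauvalrajwaa/HELIOS | organelle_pipeline/isomer.py | _kmers
-- ===== SOURCE A (Python) =====
-- def _kmers(sequence: str, kmer_size: int) -> set[str]:
--     if kmer_size <= 0:
--         raise ValueError("kmer_size must be > 0")
--     if len(sequence) < kmer_size:
--         return set()
--     out: set[str] = set()
--     for index in range(0, len(sequence) - kmer_size + 1):
--         kmer = sequence[index : index + kmer_size]
--         if "N" in kmer:
--             continue
--         out.add(kmer)
--     return out
-- ===== SOURCE B (Python) =====
-- def _kmers(sequence: str, kmer_size: int) -> set[str]: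
--     if kmer_size <= 0:
--         raise ValueError("kmer_size must be > 0")
--     out: set[str] = set()
--     run = 0  # length of the current N-free run ending at the current position
--     for i, ch in enumerate(sequence):
--         run = 0 if ch == "N" else run + 1
--         if run >= kmer_size:
--             out.add(sequence[i - kmer_size + 1 : i + 1])
--     return out
-- ===== Notes on version B (the rewrite author's own statement) =====
-- stated objective: alternative
-- what changed: Replaces the per-window substring scan for 'N' with a single streaming pass that maintains the length of the current N-free run and adds a window exactly when the run reaches kmer_size.
import Mathlib
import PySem

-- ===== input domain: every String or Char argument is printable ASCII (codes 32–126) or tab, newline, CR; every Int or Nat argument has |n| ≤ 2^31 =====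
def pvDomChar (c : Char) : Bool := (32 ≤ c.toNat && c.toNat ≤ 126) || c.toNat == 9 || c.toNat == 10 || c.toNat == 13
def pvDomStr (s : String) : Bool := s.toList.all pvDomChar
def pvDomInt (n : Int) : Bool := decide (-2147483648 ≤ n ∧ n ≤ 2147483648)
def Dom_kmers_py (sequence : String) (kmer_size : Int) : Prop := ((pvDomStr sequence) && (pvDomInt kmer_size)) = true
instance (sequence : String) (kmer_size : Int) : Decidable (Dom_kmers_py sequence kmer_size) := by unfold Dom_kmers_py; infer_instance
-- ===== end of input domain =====

-- B replaces A's per-window 'N' scan by a single streaming pass keeping the length of the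
-- current N-free run (alternative decomposition; return-value equivalence proved for kmer_size > 0).

-- ===== PORT A =====
def kmers_py (sequence : String) (kmer_size : Int) : List String :=
  if kmer_size ≤ 0 then []            -- Python raises ValueError here; excluded by Pre_
  else if ((sequence.toList.length : Int)) < kmer_size then []
  else
    (PySem.List.pyRange 0 ((sequence.toList.length : Int) - kmer_size + 1) 1).foldl
      (fun out index =>
        let kmer := PySem.List.slice sequence.toList (some index) (some (index + kmer_size))
        if 'N' ∈ kmer then out else PySem.Set.add out (String.ofList kmer))
      []

-- ===== PORT B =====
def kmers_py_alt (sequence : String) (kmer_size : Int) : List String :=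
  if kmer_size ≤ 0 then []            -- Python raises ValueError here; excluded by Pre_
  else
    ((PySem.List.enumerate sequence.toList 0).foldl
      (fun st p =>
        let run : Int := if p.2 = 'N' then 0 else st.2 + 1
        let out : List String :=
          if kmer_size ≤ run then
            PySem.Set.add st.1
              (String.ofList (PySem.List.slice sequence.toList
                (some (p.1 - kmer_size + 1)) (some (p.1 + 1))))
          else st.1
        (out, run))
      (([] : List String), (0 : Int))).1

-- ===== PRECONDITION & SPEC =====
-- Pre_ excludes exactly kmer_size ≤ 0, where Python A raises ValueError.
def Pre_kmers_py (sequence : String) (kmer_size : Int) : Prop := 0 < kmer_size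
instance (sequence : String) (kmer_size : Int) : Decidable (Pre_kmers_py sequence kmer_size) := by unfold Pre_kmers_py; infer_instance
def pvWitness_kmers_py : String × Int := ("ACGNTA", 2)

def Spec_kmers_py (sequence : String) (kmer_size : Int) (out : List String) : Prop := out = kmers_py_alt sequence kmer_size
instance (sequence : String) (kmer_size : Int) (out : List String) : Decidable (Spec_kmers_py sequence kmer_size out) := by unfold Spec_kmers_py; infer_instance

-- ===== CLAIM (what is proved, stated in full; the proofs are below) =====
def Claim_equal_kmers_py : Prop := ∀ (sequence : String) (kmer_size : Int), Dom_kmers_py sequence kmer_size → Pre_kmers_py sequence kmer_size → Spec_kmers_py sequence kmer_size (kmers_py sequence kmer_size)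

-- ===== LEMMAS AND PROOFS =====

-- length of the maximal 'N'-free suffix of l
def runLen (l : List Char) : Nat := (l.reverse.takeWhile (fun c => c != 'N')).length

-- the windows A keeps, in order
def listA (cs : List Char) (k : Nat) : List String :=
  (List.range (cs.length + 1 - k)).filterMap (fun j =>
    if 'N' ∈ (cs.drop j).take k then none else some (String.ofList ((cs.drop j).take k)))

-- the windows B emits from position m on, in order
def Estream (cs : List Char) (k m : Nat) : List String :=
  (List.range' m (cs.length - m)).filterMap (fun i =>
    if k ≤ runLen (cs.take (i+1)) then some (String.ofList ((cs.drop (i+1-k)).take k)) else none)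

theorem runLen_le (l : List Char) : runLen l ≤ l.length := by
  have : ∀ (xs : List Char), (xs.takeWhile (fun c => c != 'N')).length ≤ xs.length := by
    intro xs
    induction xs with
    | nil => simp
    | cons x t ih => by_cases h : (x != 'N') <;> simp [h]; omega

  simpa [runLen] using this l.reverse

theorem runLen_snoc (l : List Char) (c : Char) :
    runLen (l ++ [c]) = if c = 'N' then 0 else runLen l + 1 := by
  by_cases h : c = 'N' <;> simp [runLen, h]

theorem takeWhile_len_ge {α : Type} (p : α → Bool) :
    ∀ (k : Nat) (xs : List α),
      (k ≤ (xs.takeWhile p).length ↔ k ≤ xs.length ∧ ∀ c ∈ xs.take k, p c) := by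
  intro k
  induction k with
  | zero => intro xs; simp
  | succ j ih =>
    intro xs
    cases xs with
    | nil => simp
    | cons x t =>
      by_cases hx : p x
      · simp only [List.takeWhile_cons, hx, if_true, List.length_cons, List.take_succ_cons,
          List.mem_cons, Nat.succ_le_succ_iff]
        rw [ih t]
        constructor
        · rintro ⟨h1, h2⟩
          refine ⟨h1, ?_⟩
          rintro c (rfl | hc)
          · exact hx
          · exact h2 c hc
        · rintro ⟨h1, h2⟩
          exact ⟨h1, fun c hc => h2 c (Or.inr hc)⟩
      · simp only [List.takeWhile_cons, hx, List.take_succ_cons]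
        constructor
        · intro h; simp at h
        · rintro ⟨-, h2⟩
          exact absurd (h2 x (List.mem_cons_self ..)) (by simpa using hx)

theorem runLen_ge_iff (l : List Char) (k : Nat) :
    k ≤ runLen l ↔ k ≤ l.length ∧ 'N' ∉ l.drop (l.length - k) := by
  have h := takeWhile_len_ge (fun c => c != 'N') k l.reverse
  rw [runLen, h, List.length_reverse]
  constructor
  · rintro ⟨h1, h2⟩
    refine ⟨h1, fun hmem => ?_⟩
    have : 'N' ∈ l.reverse.take k := by
      rw [List.take_reverse, List.mem_reverse]; exact hmem
    simpa using h2 _ this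
  · rintro ⟨h1, h2⟩
    refine ⟨h1, fun c hc => ?_⟩
    rw [List.take_reverse, List.mem_reverse] at hc
    simp only [bne_iff_ne, ne_eq]
    rintro rfl; exact h2 hc

-- fold with an if-skip body = fold of Set.add over the filterMap'd list
theorem foldl_windows (cs : List Char) (k : Nat) :
    ∀ (idxs : List Nat) (out : List String),
      idxs.foldl (fun out j =>
          if 'N' ∈ (cs.drop j).take k then out
          else PySem.Set.add out (String.ofList ((cs.drop j).take k))) out
      = (idxs.filterMap (fun j =>
          if 'N' ∈ (cs.drop j).take k then none
          else some (String.ofList ((cs.drop j).take k)))).foldl PySem.Set.add out := by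
  intro idxs
  induction idxs with
  | nil => intro out; simp
  | cons j t ih =>
    intro out
    by_cases h : 'N' ∈ (cs.drop j).take k <;> simp [h, ih]

-- A's port computes foldl Set.add over listA
theorem kmers_eq_listA (s : String) (k : Nat) (_hk : 1 ≤ k) :
    kmers_py s (k : Int) = (listA s.toList k).foldl PySem.Set.add [] := by
  have hkpos : ¬ ((k : Int) ≤ 0) := by omega
  by_cases hlen : ((s.toList.length : Int)) < (k : Int)
  · have hn : s.toList.length < k := by exact_mod_cast hlen
    have h0 : s.toList.length + 1 - k = 0 := by omega
    unfold kmers_py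
    rw [if_neg hkpos, if_pos hlen, listA, h0]
    simp
  · have hn : k ≤ s.toList.length := by omega
    unfold kmers_py
    rw [if_neg hkpos, if_neg hlen]
    have hb : (s.toList.length : Int) - (k : Int) + 1 = ((s.toList.length + 1 - k : Nat) : Int) := by
      omega
    rw [hb, PySem.List.pyRange_one]
    rw [show (((s.toList.length + 1 - k : Nat) : Int) - 0).toNat = s.toList.length + 1 - k by omega]
    rw [List.foldl_map]
    simp only [zero_add, PySem.List.slice_natCast_add]
    rw [foldl_windows]
    rfl

-- B's loop invariant
theorem B_loop (cs : List Char) (k : Nat) (_hk : 1 ≤ k) :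
    ∀ (rest : List Char) (m : Nat) (out : List String), cs.drop m = rest →
      (PySem.List.enumerate rest (m : Int)).foldl
        (fun st p =>
          let run : Int := if p.2 = 'N' then 0 else st.2 + 1
          let out' : List String :=
            if (k : Int) ≤ run then
              PySem.Set.add st.1
                (String.ofList (PySem.List.slice cs (some (p.1 - (k : Int) + 1)) (some (p.1 + 1))))
            else st.1
          (out', run))
        (out, (runLen (cs.take m) : Nat))
      = ((Estream cs k m).foldl PySem.Set.add out, (runLen cs : Int)) := by
  intro rest
  induction rest with
  | nil =>
    intro m out hdrop
    have hm : cs.length ≤ m := List.drop_eq_nil_iff.mp hdrop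
    have h1 : cs.take m = cs := List.take_of_length_le hm
    have h2 : cs.length - m = 0 := by omega
    simp [PySem.List.enumerate, Estream, h1, h2]
  | cons c rest ih =>
    intro m out hdrop
    have hm : m < cs.length := by
      have := congrArg List.length hdrop
      simp at this; omega
    have hcm : cs[m]? = some c := by
      have : (cs.drop m)[0]? = some c := by rw [hdrop]; rfl
      simpa using this
    have htake : cs.take (m+1) = cs.take m ++ [c] := by
      rw [List.take_add_one, hcm]; rfl
    have hrun : (if c = 'N' then (0:Int) else (runLen (cs.take m) : Int) + 1)
        = ((runLen (cs.take (m+1)) : Nat) : Int) := by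
      rw [htake, runLen_snoc]
      by_cases h : c = 'N' <;> simp [h]
    have hdrop' : cs.drop (m+1) = rest := by
      have : (cs.drop m).tail = rest := by rw [hdrop]; rfl
      simpa [List.tail_drop] using this
    have hlen : cs.length - m = (cs.length - (m+1)) + 1 := by omega
    rw [PySem.List.enumerate_cons]
    simp only [List.foldl_cons]
    rw [Estream, hlen, List.range'_succ, List.filterMap_cons]
    by_cases hcond : k ≤ runLen (cs.take (m+1))
    · have hcondI : ((k:Int) ≤ if c = 'N' then (0:Int) else (runLen (cs.take m) : Int) + 1) := by
        rw [hrun]; exact_mod_cast hcond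
      have hkm : k ≤ m + 1 := by
        have := runLen_le (cs.take (m+1))
        have h2 : (cs.take (m+1)).length ≤ m + 1 := by simp
        have h3 : runLen (cs.take (m+1)) ≤ m + 1 := le_trans (runLen_le _) h2
        omega
      have hslice : PySem.List.slice cs (some ((m:Int) - (k:Int) + 1)) (some ((m:Int) + 1))
          = (cs.drop (m+1-k)).take k := by
        have h1 : (m:Int) - (k:Int) + 1 = ((m+1-k : Nat) : Int) := by omega
        have h2 : (m:Int) + 1 = ((m+1-k : Nat) : Int) + (k : Int) := by omega
        rw [h1, h2, PySem.List.slice_natCast_add]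
      simp only [hrun, if_pos (hrun ▸ hcondI), if_pos hcond, hslice, List.foldl_cons]
      have := ih (m+1) (PySem.Set.add out (String.ofList ((cs.drop (m+1-k)).take k))) hdrop'
      rw [show ((m:Int) + 1) = ((m+1 : Nat) : Int) by omega]
      rw [this, Estream]
    · have hcondI : ¬ ((k:Int) ≤ if c = 'N' then (0:Int) else (runLen (cs.take m) : Int) + 1) := by
        rw [hrun]; exact_mod_cast hcond
      simp only [hrun, if_neg (hrun ▸ hcondI), if_neg hcond]
      have := ih (m+1) out hdrop'
      rw [show ((m:Int) + 1) = ((m+1 : Nat) : Int) by omega]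
      rw [this, Estream]

theorem Estream_eq_listA (cs : List Char) (k : Nat) (hk : 1 ≤ k) :
    Estream cs k 0 = listA cs k := by
  by_cases hn : cs.length + 1 ≤ k
  · have h0 : cs.length + 1 - k = 0 := by omega
    rw [Estream, listA, h0]
    simp only [List.range_zero, List.filterMap_nil, Nat.sub_zero]
    rw [List.filterMap_eq_nil_iff]
    intro i hi
    have h1 := runLen_le (cs.take (i+1))
    have h2 : (cs.take (i+1)).length ≤ cs.length := by simp
    rw [if_neg (by omega)]
  · have hsplit : cs.length = (k-1) + (cs.length + 1 - k) := by omega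
    rw [Estream, listA, Nat.sub_zero]
    rw [show List.range' 0 cs.length = List.range' 0 (k-1) ++ List.range' (0 + (k-1)) (cs.length + 1 - k) by
      conv_lhs => rw [hsplit]
      rw [← List.range'_append_1]]
    rw [List.filterMap_append]
    have hfirst : (List.range' 0 (k-1)).filterMap (fun i =>
        if k ≤ runLen (cs.take (i+1)) then some (String.ofList ((cs.drop (i+1-k)).take k)) else none) = [] := by
      rw [List.filterMap_eq_nil_iff]
      intro i hi
      rw [List.mem_range'_1] at hi
      have h1 := runLen_le (cs.take (i+1))
      have h2 : (cs.take (i+1)).length ≤ i + 1 := by simp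
      rw [if_neg (by omega)]
    rw [hfirst, List.nil_append, zero_add, List.range'_eq_map_range, List.filterMap_map]
    apply List.filterMap_congr
    intro j hj
    rw [List.mem_range] at hj
    have hjk : j + k ≤ cs.length := by omega
    simp only [Function.comp]
    rw [show k - 1 + j + 1 = j + k from by omega]
    rw [show j + k - k = j from by omega]
    have hcond : k ≤ runLen (cs.take (j+k)) ↔ 'N' ∉ (cs.drop j).take k := by
      rw [runLen_ge_iff]
      have hlen : (cs.take (j+k)).length = j + k := by simp [List.length_take]; omega
      rw [hlen]
      have : (cs.take (j+k)).drop (j + k - k) = (cs.drop j).take k := by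
        rw [show j + k - k = j by omega, List.drop_take]
        congr 1; omega
      rw [this]
      constructor
      · rintro ⟨-, h⟩; exact h
      · intro h; exact ⟨by omega, h⟩
    by_cases hmem : 'N' ∈ (cs.drop j).take k
    · rw [if_neg (by rw [hcond]; exact fun h => h hmem), if_pos hmem]
    · rw [if_pos (hcond.mpr hmem), if_neg hmem]

-- ===== VERDICT (by name: the statement is the Claim_ definition above) =====
theorem kmers_py_spec : Claim_equal_kmers_py := by
  intro s ks _ hpre
  unfold Spec_kmers_py
  have hpre' : (0 : Int) < ks := hpre
  obtain ⟨k, rfl⟩ : ∃ k : Nat, ks = (k : Int) := ⟨ks.toNat, (Int.toNat_of_nonneg (le_of_lt hpre')).symm⟩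
  have hk : 1 ≤ k := by exact_mod_cast hpre'
  rw [kmers_eq_listA s k hk]
  unfold kmers_py_alt
  have hkpos : ¬ ((k : Int) ≤ 0) := by omega
  rw [if_neg hkpos, Estream_eq_listA s.toList k hk |>.symm]
  have h := B_loop s.toList k hk s.toList 0 [] (by simp)
  rw [List.take_zero] at h
  exact congrArg Prod.fst h.symm
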